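-- pv_equiv track=rewrite | github.com/xG3R4RD0x/Testing-and-QA | global skills/complete-tasks-from-codebase/complete-tasks-v2.py | _fuzzy_match_title
-- ===== SOURCE A (Python) =====
-- from typing import Dict, List, Tuple, Any, Optional
--
-- def _fuzzy_match_title(provided: str, expected: List[str]) -> Optional[str]:
--     """Fuzzy match a provided title against expected titles."""
--     provided_lower = provided.lower().strip()
--
--     # Exact match
--     for expected_title in expected:
--         if provided_lower == expected_title.lower():
--             return expected_title
--
--     # Partial match
--     for expected_title in expected:
--         if provided_lower in expected_title.lower() or expected_title.lower() in provided_lower: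
--             return expected_title
--
--     return None
-- ===== SOURCE B (Python) =====
-- from typing import List, Optional
--
-- def _fuzzy_match_title(provided: str, expected: List[str]) -> Optional[str]:
--     """Single pass: return immediately on exact match; remember the first
--     partial match and return it only after the whole list is scanned."""
--     provided_lower = provided.lower().strip()
--     first_partial = None
--     for expected_title in expected:
--         title_lower = expected_title.lower()
--         if title_lower == provided_lower:
--             return expected_title
--         if first_partial is None and (provided_lower in title_lower or title_lower in provided_lower):
--             first_partial = expected_title
--     return first_partial
-- ===== Notes on version B (the rewrite author's own statement) =====
-- stated objective: alternative
-- what changed: Replaces A's two sequential passes over expected (exact pass, then partial pass) with one pass that returns on an exact match and defers the first partial match in an accumulator until the scan ends.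
import Mathlib
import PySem

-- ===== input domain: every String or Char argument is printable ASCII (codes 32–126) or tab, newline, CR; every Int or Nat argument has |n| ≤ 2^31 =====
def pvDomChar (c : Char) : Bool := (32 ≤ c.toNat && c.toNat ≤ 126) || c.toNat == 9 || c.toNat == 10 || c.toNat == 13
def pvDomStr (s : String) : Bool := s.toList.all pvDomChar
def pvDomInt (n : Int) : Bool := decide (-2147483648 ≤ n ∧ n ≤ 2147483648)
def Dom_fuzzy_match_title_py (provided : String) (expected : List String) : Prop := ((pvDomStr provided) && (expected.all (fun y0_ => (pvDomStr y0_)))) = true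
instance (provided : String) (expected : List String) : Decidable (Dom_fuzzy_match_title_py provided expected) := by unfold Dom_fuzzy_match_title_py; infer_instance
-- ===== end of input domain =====

-- ===== PORT A =====
-- A: two passes — first an exact-match scan, then a partial (containment) scan.
def pvA_exact (pl : String) : List String → Option String
  | [] => none
  | t :: rest => if pl == PySem.Str.lower t then some t else pvA_exact pl rest

def pvA_partial (pl : String) : List String → Option String
  | [] => none
  | t :: rest =>
      if PySem.Str.isIn pl (PySem.Str.lower t) || PySem.Str.isIn (PySem.Str.lower t) pl
      then some t else pvA_partial pl rest

def fuzzy_match_title_py (provided : String) (expected : List String) : Option String :=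
  let pl := PySem.Str.strip (PySem.Str.lower provided)
  match pvA_exact pl expected with
  | some t => some t
  | none => pvA_partial pl expected

-- ===== PORT B =====
-- B: one pass with a `first_partial` accumulator; exact match returns immediately.
def pvB_loop (pl : String) : List String → Option String → Option String
  | [], firstPartial => firstPartial
  | t :: rest, firstPartial =>
      let tl := PySem.Str.lower t
      if tl == pl then some t
      else pvB_loop pl rest
        (if firstPartial.isNone && (PySem.Str.isIn pl tl || PySem.Str.isIn tl pl)
         then some t else firstPartial)

def fuzzy_match_title_py_alt (provided : String) (expected : List String) : Option String :=
  pvB_loop (PySem.Str.strip (PySem.Str.lower provided)) expected none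

-- ===== PRECONDITION & SPEC =====
def Spec_fuzzy_match_title_py (provided : String) (expected : List String) (out : Option String) : Prop := out = fuzzy_match_title_py_alt provided expected
instance (provided : String) (expected : List String) (out : Option String) : Decidable (Spec_fuzzy_match_title_py provided expected out) := by unfold Spec_fuzzy_match_title_py; infer_instance

-- ===== CLAIM (what is proved, stated in full; the proofs are below) =====
def Claim_equal_fuzzy_match_title_py : Prop := ∀ (provided : String) (expected : List String), Dom_fuzzy_match_title_py provided expected → Spec_fuzzy_match_title_py provided expected (fuzzy_match_title_py provided expected)

-- ===== LEMMAS AND PROOFS =====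

-- Loop invariant: B's single pass equals "exact result, else the recorded partial, else A's partial result".
theorem pvB_loop_eq (pl : String) (xs : List String) (acc : Option String) :
    pvB_loop pl xs acc = ((pvA_exact pl xs).or (acc.or (pvA_partial pl xs))) := by
  induction xs generalizing acc with
  | nil => cases acc <;> simp [pvB_loop, pvA_exact, pvA_partial]
  | cons t rest ih =>
      by_cases hx : PySem.Str.lower t == pl
      · have hx' : (pl == PySem.Str.lower t) = true := by
          simp only [beq_iff_eq] at hx ⊢; exact hx.symm
        simp [pvB_loop, pvA_exact, hx, hx']
      · have hx2 : (pl == PySem.Str.lower t) = false := by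
          simp only [beq_iff_eq] at hx
          simp only [beq_eq_false_iff_ne]
          exact fun h => hx h.symm
        simp only [pvB_loop, pvA_exact, hx2, hx, Bool.false_eq_true, if_false, ih]
        cases acc with
        | some p => simp
        | none =>
            simp only [pvA_partial, Option.isNone_none, Bool.true_and]
            split_ifs <;> simp_all

-- ===== VERDICT (by name: the statement is the Claim_ definition above) =====
theorem fuzzy_match_title_py_spec : Claim_equal_fuzzy_match_title_py := by
  intro provided expected _
  unfold Spec_fuzzy_match_title_py fuzzy_match_title_py fuzzy_match_title_py_alt
  rw [pvB_loop_eq]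
  cases h : pvA_exact (PySem.Str.strip (PySem.Str.lower provided)) expected <;> simp [h]
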